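-- pv_equiv track=rewrite | github.com/james5635/GeekForGeek-Data-Structure-and-Algorithm | string/make_anagrams_no_deletion.py | minOperationsNoDeletion
-- ===== SOURCE A (Python) =====
-- def minOperationsNoDeletion(s1, s2):
--     """
--     Minimum operations (add/change) to make strings anagrams
--     without deleting any characters
--     """
--     m, n = len(s1), len(s2)
--
--     # Count frequency of each character
--     count1 = [0] * 26
--     count2 = [0] * 26
--
--     for char in s1:
--         count1[ord(char) - ord("a")] += 1
--
--     for char in s2:
--         count2[ord(char) - ord("a")] += 1
--
--     operations = 0
--
--     # Calculate operations needed
--     for i in range(26):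
--         if count1[i] > count2[i]:
--             # Need to add (count1[i] - count2[i]) of char[i] to s2
--             operations += count1[i] - count2[i]
--         elif count2[i] > count1[i]:
--             # Need to add (count2[i] - count1[i]) of char[i] to s1
--             operations += count2[i] - count1[i]
--
--     return operations
-- ===== SOURCE B (Python) =====
-- def minOperationsNoDeletion(s1, s2):
--     """
--     Minimum operations (add/change) to make strings anagrams
--     without deleting any characters
--     """
--     a = sorted(s1)
--     b = sorted(s2)
--     i = j = ops = 0
--     while i < len(a) and j < len(b):
--         if a[i] == b[j]:
--             i += 1
--             j += 1
--         elif a[i] < b[j]: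
--             ops += 1
--             i += 1
--         else:
--             ops += 1
--             j += 1
--     return ops + (len(a) - i) + (len(b) - j)
-- ===== Notes on version B (the rewrite author's own statement) =====
-- stated objective: alternative
-- what changed: Replaces the two fixed 26-slot frequency arrays and the per-bucket signed comparison loop by sorting both strings and counting unmatched characters in a single two-pointer merge of the sorted sequences (ops = characters that fail to pair up across the merge).
-- intended difference: On inputs where some character of code 71-96 and its +26 lowercase partner have count differences of opposite sign, A's negative-index wraparound merges the two distinct characters into one array slot so the differences cancel and A returns a too-small operation count, while B matches the two characters separately in the sorted merge, which is the intended anagram cost (e.g. A('`','z') = 0 though the strings share no character; B returns 2). — e.g. on minOperationsNoDeletion("`", "z"): A returns 0, B returns 2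
import Mathlib
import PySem

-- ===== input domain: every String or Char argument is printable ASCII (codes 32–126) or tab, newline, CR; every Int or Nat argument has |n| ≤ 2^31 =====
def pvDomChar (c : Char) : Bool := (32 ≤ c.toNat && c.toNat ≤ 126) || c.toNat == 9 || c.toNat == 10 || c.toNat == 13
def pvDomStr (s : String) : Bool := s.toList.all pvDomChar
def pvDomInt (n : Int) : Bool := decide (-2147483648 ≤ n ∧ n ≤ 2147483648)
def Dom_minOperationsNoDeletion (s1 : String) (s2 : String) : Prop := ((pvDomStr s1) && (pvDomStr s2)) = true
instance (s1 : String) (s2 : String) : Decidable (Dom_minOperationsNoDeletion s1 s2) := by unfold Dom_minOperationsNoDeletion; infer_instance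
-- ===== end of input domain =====

-- B replaces A's two fixed 26-slot frequency arrays and signed per-bucket comparison loop
-- by sorting both strings and counting unmatched characters in one two-pointer merge (alternative);
-- where A's negative-index wraparound merges a code-71..96 character with its +26 partner
-- into one bucket and their count differences cancel, B returns the intended (larger) cost.


-- ===== PORT A =====
-- 'count[i] += 1' with Python's index semantics (negative indices count from the end);
-- indices out of even the negative range (IndexError in A) are outside Pre_.
def pvBump (l : List Int) (i : Int) : List Int :=
  PySem.List.pySetD l i (PySem.List.pyGetD l i 0 + 1)

-- the loop 'for char in s: count[ord(char) - ord("a")] += 1' over [0] * 26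
def pvCountArr (cs : List Char) : List Int :=
  cs.foldl (fun cnt c => pvBump cnt ((c.toNat : Int) - 97)) (List.replicate 26 0)

def minOperationsNoDeletion (s1 : String) (s2 : String) : Int :=
  let count1 := pvCountArr s1.toList
  let count2 := pvCountArr s2.toList
  (PySem.List.pyRange 0 26 1).foldl (fun operations i =>
    let a := PySem.List.pyGetD count1 i 0
    let b := PySem.List.pyGetD count2 i 0
    if a > b then operations + (a - b)
    else if b > a then operations + (b - a)
    else operations) 0

-- ===== PORT B =====
-- the while loop of Source B: two pointers over the two sorted lists, one op per unmatched
-- character, plus the lengths of the unconsumed tails when one side runs out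
def pvMergeOps : List Char → List Char → Int
  | [], ys => (ys.length : Int)
  | x :: xs, [] => ((x :: xs).length : Int)
  | x :: xs, y :: ys =>
      if x = y then pvMergeOps xs ys
      else if x < y then 1 + pvMergeOps xs (y :: ys)
      else 1 + pvMergeOps (x :: xs) ys

def minOperationsNoDeletion_alt (s1 : String) (s2 : String) : Int :=
  pvMergeOps (PySem.List.sorted s1.toList (fun c => c) false)
             (PySem.List.sorted s2.toList (fun c => c) false)

-- ===== PRECONDITION & SPEC =====
-- Pre_ is exactly A's return domain: every character code in 71..122; on any other character
-- ord(c) - 97 leaves even the valid negative-index range of A's 26-slot lists and A raises IndexError.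
def Pre_minOperationsNoDeletion (s1 : String) (s2 : String) : Prop :=
  ((s1.toList ++ s2.toList).all (fun c => decide (71 ≤ c.toNat) && decide (c.toNat ≤ 122))) = true
instance (s1 : String) (s2 : String) : Decidable (Pre_minOperationsNoDeletion s1 s2) := by
  unfold Pre_minOperationsNoDeletion; infer_instance

def pvWitness_minOperationsNoDeletion : String × String := ("abc", "cb")

-- count difference of one character between the two strings
def pvDiff (s1 : String) (s2 : String) (c : Char) : Int :=
  (s1.toList.count c : Int) - (s2.toList.count c : Int)

-- On inputs where some character of code 71..96 and its +26 lowercase partner have count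
-- differences of opposite sign, A's negative-index wraparound merges the two distinct
-- characters into one array slot so their differences cancel and A returns a too-small count,
-- while B matches the two characters separately — the intended anagram cost.
def D_minOperationsNoDeletion (s1 : String) (s2 : String) : Prop :=
  ((List.range 26).any (fun j =>
    decide (pvDiff s1 s2 (Char.ofNat (71 + j)) * pvDiff s1 s2 (Char.ofNat (97 + j)) < 0))) = true
instance (s1 : String) (s2 : String) : Decidable (D_minOperationsNoDeletion s1 s2) := by
  unfold D_minOperationsNoDeletion; infer_instance

def Spec_minOperationsNoDeletion (s1 : String) (s2 : String) (out : Int) : Prop :=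
  ¬ D_minOperationsNoDeletion s1 s2 → out = minOperationsNoDeletion_alt s1 s2
instance (s1 : String) (s2 : String) (out : Int) : Decidable (Spec_minOperationsNoDeletion s1 s2 out) := by
  unfold Spec_minOperationsNoDeletion; infer_instance

def pvDiffWitness_minOperationsNoDeletion : String × String := ("`", "z")
def pvDiffWitnessOut_minOperationsNoDeletion : Int × Int := (0, 2)

-- ===== CLAIM (what is proved, stated in full; the proofs are below) =====
def Claim_unchanged_minOperationsNoDeletion : Prop := ∀ (s1 : String) (s2 : String), Dom_minOperationsNoDeletion s1 s2 → Pre_minOperationsNoDeletion s1 s2 → Spec_minOperationsNoDeletion s1 s2 (minOperationsNoDeletion s1 s2)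
def Claim_changed_minOperationsNoDeletion : Prop := Dom_minOperationsNoDeletion (pvDiffWitness_minOperationsNoDeletion.1) (pvDiffWitness_minOperationsNoDeletion.2) ∧ Pre_minOperationsNoDeletion (pvDiffWitness_minOperationsNoDeletion.1) (pvDiffWitness_minOperationsNoDeletion.2) ∧ D_minOperationsNoDeletion (pvDiffWitness_minOperationsNoDeletion.1) (pvDiffWitness_minOperationsNoDeletion.2) ∧ minOperationsNoDeletion (pvDiffWitness_minOperationsNoDeletion.1) (pvDiffWitness_minOperationsNoDeletion.2) = pvDiffWitnessOut_minOperationsNoDeletion.1 ∧ minOperationsNoDeletion_alt (pvDiffWitness_minOperationsNoDeletion.1) (pvDiffWitness_minOperationsNoDeletion.2) = pvDiffWitnessOut_minOperationsNoDeletion.2 ∧ pvDiffWitnessOut_minOperationsNoDeletion.1 ≠ pvDiffWitnessOut_minOperationsNoDeletion.2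
def Claim_exact_minOperationsNoDeletion : Prop := ∀ (s1 : String) (s2 : String), Dom_minOperationsNoDeletion s1 s2 → Pre_minOperationsNoDeletion s1 s2 → D_minOperationsNoDeletion s1 s2 → minOperationsNoDeletion s1 s2 ≠ minOperationsNoDeletion_alt s1 s2

-- ===== LEMMAS AND PROOFS =====

theorem pv_char_eq (a b : Char) (h : a.toNat = b.toNat) : a = b := by
  apply Char.ext; unfold Char.toNat at h
  exact UInt32.toNat_inj.mp h

theorem pv_toNat_ofNat (n : Nat) (h : n ≤ 122) : (Char.ofNat n).toNat = n := by
  rw [Char.toNat_ofNat, if_pos (Or.inl (by omega))]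

-- pySetD at a negative in-range index sets from the end (Python's rule)
theorem pv_pySetD_neg {α : Type} (xs : List α) (k : Nat) (v : α) (h1 : 0 < k) (h2 : k ≤ xs.length) :
    PySem.List.pySetD xs (-(k:Int)) v = xs.set (xs.length - k) v := by
  rw [PySem.List.pySetD, PySem.List.pySet?, PySem.List.pyIdx?,
    if_neg (by omega), if_pos (by omega : -(xs.length:Int) ≤ -(k:Int))]
  simp

-- the bucket A's loop actually increments for a character of code 71..122
def pvBucket (c : Char) : Nat :=
  if 97 ≤ c.toNat then c.toNat - 97 else c.toNat - 71

-- invariant of A's counting loop: slot j collects the j-th lowercase letter AND, through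
-- negative-index wraparound, the character 26 codes below it
theorem pv_fold_spec : ∀ (cs : List Char), (∀ c ∈ cs, 71 ≤ c.toNat ∧ c.toNat ≤ 122) →
    ∀ (l : List Int), l.length = 26 →
    (cs.foldl (fun cnt c => pvBump cnt ((c.toNat : Int) - 97)) l).length = 26 ∧
    ∀ j : Nat, j < 26 →
      (cs.foldl (fun cnt c => pvBump cnt ((c.toNat : Int) - 97)) l).getD j 0
        = l.getD j 0 + (cs.count (Char.ofNat (97 + j)) : Int) + (cs.count (Char.ofNat (71 + j)) : Int) := by
  intro cs
  induction cs with
  | nil => intro _ l hl; exact ⟨hl, fun j hj => by simp⟩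
  | cons c t ih =>
    intro hcs l hl
    have hc := hcs c (by simp)
    have hb : pvBump l ((c.toNat : Int) - 97) = l.set (pvBucket c)
        (l.getD (pvBucket c) 0 + 1) := by
      by_cases h97 : 97 ≤ c.toNat
      · have hnn : (0:Int) ≤ (c.toNat : Int) - 97 := by omega
        have hk : ((c.toNat : Int) - 97).toNat = pvBucket c := by
          rw [pvBucket, if_pos h97]; omega
        rw [pvBump, PySem.List.pySetD_of_nonneg _ _ hnn,
          PySem.List.pyGetD_eq_getElem _ _ hnn (by simp [hl]; omega)]
        simp only [hk]
        rw [List.getD_eq_getElem _ _ (by rw [pvBucket, if_pos h97]; omega)]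
      · have hk : ((c.toNat : Int) - 97) = -(((97 - c.toNat : Nat)):Int) := by omega
        have hkl : 97 - c.toNat ≤ l.length := by omega
        have hbk : l.length - (97 - c.toNat) = pvBucket c := by
          rw [pvBucket, if_neg h97]; omega
        rw [pvBump, hk, pv_pySetD_neg _ _ _ (by omega) hkl,
          PySem.List.pyGetD_neg_natCast _ _ _ (by omega) hkl]
        simp only [hbk]
        rw [List.getD_eq_getElem _ _ (by rw [pvBucket]; split <;> omega)]
    have hbklt : pvBucket c < 26 := by rw [pvBucket]; split <;> omega
    have hlen : (pvBump l ((c.toNat : Int) - 97)).length = 26 := by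
      rw [hb]; simpa using hl
    obtain ⟨hL, hJ⟩ := ih (fun x hx => hcs x (by simp [hx])) _ hlen
    refine ⟨by simpa using hL, fun j hj => ?_⟩
    have hvL : (Char.ofNat (97 + j)).toNat = 97 + j := pv_toNat_ofNat _ (by omega)
    have hvW : (Char.ofNat (71 + j)).toNat = 71 + j := pv_toNat_ofNat _ (by omega)
    have hset : (pvBump l ((c.toNat : Int) - 97)).getD j 0
        = l.getD j 0 + (if pvBucket c = j then 1 else 0) := by
      rw [hb]
      rcases eq_or_ne (pvBucket c) j with he | hne
      · subst he
        rw [if_pos rfl, List.getD_eq_getElem _ _ (by simp [hl]; omega),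
          List.getElem_set, if_pos rfl, List.getD_eq_getElem _ _ (by omega)]
      · rw [if_neg hne, add_zero, List.getD_eq_getElem _ _ (by simp [hl]; omega),
          List.getElem_set, if_neg hne]
        exact (List.getD_eq_getElem _ _ (by omega)).symm
    have hcount : ((c :: t).count (Char.ofNat (97 + j)) : Int) + ((c :: t).count (Char.ofNat (71 + j)) : Int)
        = (t.count (Char.ofNat (97 + j)) : Int) + (t.count (Char.ofNat (71 + j)) : Int)
          + (if pvBucket c = j then 1 else 0) := by
      by_cases h97 : 97 ≤ c.toNat
      · have hcw : c ≠ Char.ofNat (71 + j) := by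
          intro h; have := congrArg Char.toNat h; rw [hvW] at this; omega
        rcases eq_or_ne (pvBucket c) j with he | hne
        · have hce : c = Char.ofNat (97 + j) := by
            refine pv_char_eq _ _ ?_
            rw [pvBucket, if_pos h97] at he
            omega
          rw [if_pos he, ← hce, List.count_cons_self, List.count_cons_of_ne hcw]
          push_cast; omega
        · have hce : c ≠ Char.ofNat (97 + j) := by
            intro h; apply hne
            have := congrArg Char.toNat h; rw [hvL] at this
            rw [pvBucket, if_pos h97]; omega
          rw [if_neg hne, add_zero, List.count_cons_of_ne hce, List.count_cons_of_ne hcw]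
      · have hcl : c ≠ Char.ofNat (97 + j) := by
          intro h; have := congrArg Char.toNat h; rw [hvL] at this; omega
        rcases eq_or_ne (pvBucket c) j with he | hne
        · have hce : c = Char.ofNat (71 + j) := by
            refine pv_char_eq _ _ ?_
            rw [pvBucket, if_neg h97] at he
            omega
          rw [if_pos he, ← hce, List.count_cons_self, List.count_cons_of_ne hcl]
          push_cast; omega
        · have hce : c ≠ Char.ofNat (71 + j) := by
            intro h; apply hne
            have := congrArg Char.toNat h; rw [hvW] at this
            rw [pvBucket, if_neg h97]; omega
          rw [if_neg hne, add_zero, List.count_cons_of_ne hcl, List.count_cons_of_ne hce]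
    calc (List.foldl (fun cnt c => pvBump cnt ((c.toNat : Int) - 97)) l (c :: t)).getD j 0
        = (pvBump l ((c.toNat : Int) - 97)).getD j 0
            + (t.count (Char.ofNat (97 + j)) : Int) + (t.count (Char.ofNat (71 + j)) : Int) := by
          rw [List.foldl_cons, hJ j hj]
      _ = l.getD j 0 + ((c :: t).count (Char.ofNat (97 + j)) : Int)
            + ((c :: t).count (Char.ofNat (71 + j)) : Int) := by rw [hset]; linarith [hcount]

theorem pv_countArr_getD (cs : List Char) (hcs : ∀ c ∈ cs, 71 ≤ c.toNat ∧ c.toNat ≤ 122)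
    (j : Nat) (hj : j < 26) :
    (pvCountArr cs).getD j 0
      = (cs.count (Char.ofNat (97 + j)) : Int) + (cs.count (Char.ofNat (71 + j)) : Int) := by
  have := (pv_fold_spec cs hcs (List.replicate 26 0) (by simp)).2 j hj
  rw [pvCountArr, this, List.getD_eq_getElem _ _ (by simpa using hj),
    List.getElem_replicate, zero_add]

-- A's comparison branches compute the absolute difference
theorem pv_if_abs' (acc a b : Int) :
    (if a > b then acc + (a - b) else if b > a then acc + (b - a) else acc) = acc + |a - b| := by
  rcases lt_trichotomy a b with h | h | h
  · rw [if_neg (by omega), if_pos h, abs_of_nonpos (by omega)]; ring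
  · simp [h]
  · rw [if_pos h, abs_of_nonneg (by omega)]

theorem pv_abs_add_lt (a b : Int) (h : a * b < 0) : |a + b| < |a| + |b| := by
  rw [mul_neg_iff] at h
  rw [Int.abs_eq_natAbs, Int.abs_eq_natAbs, Int.abs_eq_natAbs]
  omega

theorem pv_abs_add_eq (a b : Int) (h : ¬ a * b < 0) : |a + b| = |a| + |b| := by
  rw [not_lt, mul_nonneg_iff] at h
  rw [Int.abs_eq_natAbs, Int.abs_eq_natAbs, Int.abs_eq_natAbs]
  omega

theorem pv_foldl_sum (F : Int → Nat → Int) (G : Nat → Int)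
    (h : ∀ acc j, j < 26 → F acc j = acc + G j) :
    (List.range 26).foldl F 0 = ((List.range 26).map G).sum := by
  suffices H : ∀ (l : List Nat), (∀ j ∈ l, j < 26) → ∀ acc : Int,
      l.foldl F acc = acc + (l.map G).sum by
    simpa using H (List.range 26) (fun j hj => List.mem_range.mp hj) 0
  intro l
  induction l with
  | nil => intro _ acc; simp
  | cons x t ih =>
    intro hl acc
    simp only [List.foldl_cons, List.map_cons, List.sum_cons]
    rw [h acc x (hl x (by simp)), ih (fun j hj => hl j (by simp [hj]))]
    ring

-- unpack Pre_ into the per-character bound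
theorem pv_pre_codes (s1 s2 : String) (hpre : Pre_minOperationsNoDeletion s1 s2) :
    ∀ c ∈ s1.toList ++ s2.toList, 71 ≤ c.toNat ∧ c.toNat ≤ 122 := by
  intro c hc
  have h := List.all_eq_true.mp hpre c hc
  simp only [Bool.and_eq_true, decide_eq_true_eq] at h
  exact h

-- A as a sum over the 26 buckets, each merging a lowercase letter with its wrapped partner
theorem pv_A_sum (s1 s2 : String) (hpre : Pre_minOperationsNoDeletion s1 s2) :
    minOperationsNoDeletion s1 s2
      = ((List.range 26).map (fun j =>
          |pvDiff s1 s2 (Char.ofNat (97 + j)) + pvDiff s1 s2 (Char.ofNat (71 + j))|)).sum := by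
  have hcode := pv_pre_codes s1 s2 hpre
  have h1 : ∀ c ∈ s1.toList, 71 ≤ c.toNat ∧ c.toNat ≤ 122 :=
    fun c hc => hcode c (List.mem_append.mpr (Or.inl hc))
  have h2 : ∀ c ∈ s2.toList, 71 ≤ c.toNat ∧ c.toNat ≤ 122 :=
    fun c hc => hcode c (List.mem_append.mpr (Or.inr hc))
  rw [minOperationsNoDeletion]
  have hr := PySem.List.pyRange_zero_natCast 26
  rw [show ((26:Nat):Int) = (26:Int) from by norm_num] at hr
  rw [hr, List.foldl_map]
  refine pv_foldl_sum _ _ (fun acc j hj => ?_)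
  dsimp only
  rw [PySem.List.pyGetD_natCast, PySem.List.pyGetD_natCast,
    pv_countArr_getD s1.toList h1 j hj, pv_countArr_getD s2.toList h2 j hj, pv_if_abs']
  congr 1
  simp only [pvDiff]
  ring

-- ----- B-side: the sorted two-pointer merge counts the per-character count differences -----

-- every character of a list with codes in 71..122 is hit by exactly one of the 52 probes,
-- so the 52 counts add up to the length
theorem pv_counts_cover (ys : List Char) (hys : ∀ c ∈ ys, 71 ≤ c.toNat ∧ c.toNat ≤ 122) :
    ∑ j ∈ Finset.range 52, ys.count (Char.ofNat (71 + j)) = ys.length := by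
  induction ys with
  | nil => simp
  | cons y t ih =>
    have hy := hys y (by simp)
    have hcnt : ∀ j < 52, (y :: t).count (Char.ofNat (71 + j))
        = t.count (Char.ofNat (71 + j)) + (if y.toNat - 71 = j then 1 else 0) := by
      intro j hj
      rcases eq_or_ne (y.toNat - 71) j with he | hne
      · have : Char.ofNat (71 + j) = y := pv_char_eq _ _ (by rw [pv_toNat_ofNat _ (by omega)]; omega)
        rw [this, List.count_cons_self, if_pos he]
      · have hnc : Char.ofNat (71 + j) ≠ y := by
          intro h; apply hne
          have := congrArg Char.toNat h
          rw [pv_toNat_ofNat _ (by omega)] at this; omega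
        rw [List.count_cons_of_ne (Ne.symm hnc), if_neg hne]
        omega
    calc ∑ j ∈ Finset.range 52, (y :: t).count (Char.ofNat (71 + j))
        = ∑ j ∈ Finset.range 52, (t.count (Char.ofNat (71 + j)) + if y.toNat - 71 = j then 1 else 0) :=
          Finset.sum_congr rfl (fun j hj => hcnt j (Finset.mem_range.mp hj))
      _ = (∑ j ∈ Finset.range 52, t.count (Char.ofNat (71 + j)))
            + ∑ j ∈ Finset.range 52, (if y.toNat - 71 = j then 1 else 0) := Finset.sum_add_distrib
      _ = t.length + 1 := by
          rw [ih (fun c hc => hys c (by simp [hc])), Finset.sum_ite_eq (Finset.range 52) (y.toNat - 71) (fun _ => 1),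
            if_pos (Finset.mem_range.mpr (by omega))]
      _ = (y :: t).length := by simp

-- consuming one character x that the other side does not contain raises the 52-bucket sum by 1
theorem pv_sum_cons (x : Char) (xs ys : List Char) (hx : 71 ≤ x.toNat ∧ x.toNat ≤ 122)
    (h0 : ys.count x = 0) :
    ∑ j ∈ Finset.range 52, |((x :: xs).count (Char.ofNat (71 + j)) : Int) - (ys.count (Char.ofNat (71 + j)) : Int)|
      = (∑ j ∈ Finset.range 52, |(xs.count (Char.ofNat (71 + j)) : Int) - (ys.count (Char.ofNat (71 + j)) : Int)|) + 1 := by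
  have hterm : ∀ j < 52, |((x :: xs).count (Char.ofNat (71 + j)) : Int) - (ys.count (Char.ofNat (71 + j)) : Int)|
      = |(xs.count (Char.ofNat (71 + j)) : Int) - (ys.count (Char.ofNat (71 + j)) : Int)|
        + (if x.toNat - 71 = j then 1 else 0) := by
    intro j hj
    rcases eq_or_ne (x.toNat - 71) j with he | hne
    · have hc : Char.ofNat (71 + j) = x := pv_char_eq _ _ (by rw [pv_toNat_ofNat _ (by omega)]; omega)
      rw [hc, List.count_cons_self, h0, if_pos he]
      push_cast
      rw [sub_zero, sub_zero, abs_of_nonneg (by positivity), abs_of_nonneg (Int.natCast_nonneg _)]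
    · have hnc : Char.ofNat (71 + j) ≠ x := by
        intro h; apply hne
        have := congrArg Char.toNat h
        rw [pv_toNat_ofNat _ (by omega)] at this; omega
      rw [List.count_cons_of_ne (Ne.symm hnc), if_neg hne, add_zero]
  calc ∑ j ∈ Finset.range 52, |((x :: xs).count (Char.ofNat (71 + j)) : Int) - (ys.count (Char.ofNat (71 + j)) : Int)|
      = ∑ j ∈ Finset.range 52, (|(xs.count (Char.ofNat (71 + j)) : Int) - (ys.count (Char.ofNat (71 + j)) : Int)|
          + (if x.toNat - 71 = j then (1:Int) else 0)) :=
        Finset.sum_congr rfl (fun j hj => hterm j (Finset.mem_range.mp hj))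
    _ = _ := by
        rw [Finset.sum_add_distrib, Finset.sum_ite_eq (Finset.range 52) (x.toNat - 71) (fun _ => (1:Int)),
          if_pos (Finset.mem_range.mpr (by omega))]

theorem pv_merge_sum : ∀ (xs ys : List Char), xs.Pairwise (· ≤ ·) → ys.Pairwise (· ≤ ·) →
    (∀ c ∈ xs, 71 ≤ c.toNat ∧ c.toNat ≤ 122) → (∀ c ∈ ys, 71 ≤ c.toNat ∧ c.toNat ≤ 122) →
    pvMergeOps xs ys
      = ∑ j ∈ Finset.range 52, |(xs.count (Char.ofNat (71 + j)) : Int) - (ys.count (Char.ofNat (71 + j)) : Int)| := by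
  intro xs ys
  induction xs, ys using pvMergeOps.induct with
  | case1 ys =>
    intro _ _ _ hys
    rw [pvMergeOps]
    calc (ys.length : Int) = ((∑ j ∈ Finset.range 52, ys.count (Char.ofNat (71 + j)) : Nat) : Int) := by
          rw [pv_counts_cover ys hys]
      _ = _ := by
          push_cast
          exact Finset.sum_congr rfl (fun j _ => by
            rw [List.count_nil, Nat.cast_zero, zero_sub, abs_neg, abs_of_nonneg (Int.natCast_nonneg _)])
  | case2 x xs =>
    intro hxs _ hxsB _
    rw [pvMergeOps]
    calc ((x :: xs).length : Int) = ((∑ j ∈ Finset.range 52, (x :: xs).count (Char.ofNat (71 + j)) : Nat) : Int) := by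
          rw [pv_counts_cover (x :: xs) hxsB]
      _ = _ := by
          push_cast
          exact Finset.sum_congr rfl (fun j _ => by
            rw [List.count_nil, Nat.cast_zero, sub_zero, abs_of_nonneg (Int.natCast_nonneg _)])
  | case3 xs y ys ih =>
    intro hxs hys hxsB hysB
    rw [pvMergeOps, if_pos rfl,
      ih hxs.of_cons hys.of_cons (fun c hc => hxsB c (by simp [hc])) (fun c hc => hysB c (by simp [hc]))]
    refine Finset.sum_congr rfl (fun j _ => ?_)
    rw [List.count_cons, List.count_cons]
    push_cast
    ring_nf
  | case4 x xs y ys hne hlt ih =>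
    intro hxs hys hxsB hysB
    rw [pvMergeOps, if_neg hne, if_pos hlt,
      ih hxs.of_cons hys (fun c hc => hxsB c (by simp [hc])) hysB]
    have h0 : (y :: ys).count x = 0 := by
      rw [List.count_eq_zero]
      intro hmem
      rcases List.mem_cons.mp hmem with h | h
      · exact hne h
      · exact absurd ((List.pairwise_cons.mp hys).1 x h) (not_le.mpr hlt)
    rw [pv_sum_cons x xs (y :: ys) (hxsB x (by simp)) h0]
    ring
  | case5 x xs y ys hne hnlt ih =>
    intro hxs hys hxsB hysB
    rw [pvMergeOps, if_neg hne, if_neg hnlt,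
      ih hxs hys.of_cons hxsB (fun c hc => hysB c (by simp [hc]))]
    have hylt : y < x := lt_of_le_of_ne (not_lt.mp hnlt) (fun h => hne h.symm)
    have h0 : (x :: xs).count y = 0 := by
      rw [List.count_eq_zero]
      intro hmem
      rcases List.mem_cons.mp hmem with h | h
      · exact absurd h (ne_of_lt hylt)
      · exact absurd ((List.pairwise_cons.mp hxs).1 y h) (not_le.mpr hylt)
    have hcomm : ∀ (as bs : List Char),
        ∑ j ∈ Finset.range 52, |(as.count (Char.ofNat (71 + j)) : Int) - (bs.count (Char.ofNat (71 + j)) : Int)|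
          = ∑ j ∈ Finset.range 52, |(bs.count (Char.ofNat (71 + j)) : Int) - (as.count (Char.ofNat (71 + j)) : Int)| :=
      fun as bs => Finset.sum_congr rfl (fun j _ => abs_sub_comm _ _)
    rw [hcomm (x :: xs) ys, hcomm (x :: xs) (y :: ys),
      pv_sum_cons y ys (x :: xs) (hysB y (by simp)) h0]
    ring

-- B as the same 26 buckets, with the two characters of a bucket counted separately
theorem pv_B_sum (s1 s2 : String) (hpre : Pre_minOperationsNoDeletion s1 s2) :
    minOperationsNoDeletion_alt s1 s2
      = ((List.range 26).map (fun j => |pvDiff s1 s2 (Char.ofNat (71 + j))|)).sum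
        + ((List.range 26).map (fun j => |pvDiff s1 s2 (Char.ofNat (97 + j))|)).sum := by
  have hcode := pv_pre_codes s1 s2 hpre
  have h1 : ∀ c ∈ s1.toList, 71 ≤ c.toNat ∧ c.toNat ≤ 122 :=
    fun c hc => hcode c (List.mem_append.mpr (Or.inl hc))
  have h2 : ∀ c ∈ s2.toList, 71 ≤ c.toNat ∧ c.toNat ≤ 122 :=
    fun c hc => hcode c (List.mem_append.mpr (Or.inr hc))
  have hs1 := PySem.List.sorted_pairwise s1.toList (fun c => c)
  have hs2 := PySem.List.sorted_pairwise s2.toList (fun c => c)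
  have hc1 : ∀ c, (PySem.List.sorted s1.toList (fun c => c) false).count c = s1.toList.count c :=
    fun c => (PySem.List.sorted_perm s1.toList (fun c => c) false).count_eq c
  have hc2 : ∀ c, (PySem.List.sorted s2.toList (fun c => c) false).count c = s2.toList.count c :=
    fun c => (PySem.List.sorted_perm s2.toList (fun c => c) false).count_eq c
  rw [minOperationsNoDeletion_alt,
    pv_merge_sum _ _ hs1 hs2
      (fun c hc => h1 c ((PySem.List.mem_sorted _ _ _ _).mp hc))
      (fun c hc => h2 c ((PySem.List.mem_sorted _ _ _ _).mp hc))]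
  have hsum : ∑ j ∈ Finset.range 52,
      |((PySem.List.sorted s1.toList (fun c => c) false).count (Char.ofNat (71 + j)) : Int)
        - ((PySem.List.sorted s2.toList (fun c => c) false).count (Char.ofNat (71 + j)) : Int)|
      = ∑ j ∈ Finset.range 52, |pvDiff s1 s2 (Char.ofNat (71 + j))| :=
    Finset.sum_congr rfl (fun j _ => by rw [hc1, hc2]; rfl)
  rw [hsum, show (52:Nat) = 26 + 26 from rfl, Finset.sum_range_add]
  have hshift : ∑ j ∈ Finset.range 26, |pvDiff s1 s2 (Char.ofNat (71 + (26 + j)))|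
      = ∑ j ∈ Finset.range 26, |pvDiff s1 s2 (Char.ofNat (97 + j))| :=
    Finset.sum_congr rfl (fun j _ => by rw [show 71 + (26 + j) = 97 + j from by omega])
  rw [hshift, ← List.sum_toFinset _ List.nodup_range, ← List.sum_toFinset _ List.nodup_range,
    List.toFinset_range]

theorem pv_D_unpack (s1 s2 : String) :
    D_minOperationsNoDeletion s1 s2
      ↔ ∃ j ∈ List.range 26,
          pvDiff s1 s2 (Char.ofNat (71 + j)) * pvDiff s1 s2 (Char.ofNat (97 + j)) < 0 := by
  rw [D_minOperationsNoDeletion, List.any_eq_true]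
  simp only [decide_eq_true_eq]

-- ===== VERDICT (by name: the statement is the Claim_ definition above) =====
theorem minOperationsNoDeletion_spec : Claim_unchanged_minOperationsNoDeletion := by
  intro s1 s2 _ hpre
  unfold Spec_minOperationsNoDeletion
  intro hnd
  rw [pv_A_sum s1 s2 hpre, pv_B_sum s1 s2 hpre, ← PySem.List.sum_map_add_int]
  refine congrArg List.sum (List.map_congr_left (fun j hj => ?_))
  have hj26 := List.mem_range.mp hj
  have hnd' : ¬ pvDiff s1 s2 (Char.ofNat (71 + j)) * pvDiff s1 s2 (Char.ofNat (97 + j)) < 0 :=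
    fun h => hnd ((pv_D_unpack s1 s2).mpr ⟨j, hj, h⟩)
  rw [add_comm (|pvDiff s1 s2 (Char.ofNat (71 + j))|), ← pv_abs_add_eq _ _ (by
    intro h; exact hnd' (by rw [mul_comm] at h; exact h)), add_comm]

-- the witness value of B, evaluated through pvMergeOps' equations (decide cannot unfold
-- a well-founded recursion)
theorem pv_alt_witness : minOperationsNoDeletion_alt "`" "z" = 2 := by
  have h1 : PySem.List.sorted "`".toList (fun c => c) false = ['`'] := by decide
  have h2 : PySem.List.sorted "z".toList (fun c => c) false = ['z'] := by decide
  rw [minOperationsNoDeletion_alt, h1, h2, pvMergeOps, if_neg (by decide), if_pos (by decide),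
    pvMergeOps]
  norm_num

set_option maxRecDepth 100000 in
theorem minOperationsNoDeletion_changed : Claim_changed_minOperationsNoDeletion := by
  unfold Claim_changed_minOperationsNoDeletion
  refine ⟨by decide, by decide, by decide, by decide, pv_alt_witness, by decide⟩

theorem minOperationsNoDeletion_tight : Claim_exact_minOperationsNoDeletion := by
  intro s1 s2 _ hpre hd
  obtain ⟨j0, hj0, hlt⟩ := (pv_D_unpack s1 s2).mp hd
  rw [pv_A_sum s1 s2 hpre, pv_B_sum s1 s2 hpre, ← PySem.List.sum_map_add_int]
  apply ne_of_lt
  rw [← List.sum_toFinset _ List.nodup_range, ← List.sum_toFinset _ List.nodup_range,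
    List.toFinset_range]
  refine Finset.sum_lt_sum (fun j _ => ?_) ⟨j0, by
    simpa [Finset.mem_range] using List.mem_range.mp hj0, ?_⟩
  · calc |pvDiff s1 s2 (Char.ofNat (97 + j)) + pvDiff s1 s2 (Char.ofNat (71 + j))|
        ≤ |pvDiff s1 s2 (Char.ofNat (97 + j))| + |pvDiff s1 s2 (Char.ofNat (71 + j))| := abs_add_le _ _
      _ = _ := by ring
  · calc |pvDiff s1 s2 (Char.ofNat (97 + j0)) + pvDiff s1 s2 (Char.ofNat (71 + j0))|
        < |pvDiff s1 s2 (Char.ofNat (97 + j0))| + |pvDiff s1 s2 (Char.ofNat (71 + j0))| :=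
          pv_abs_add_lt _ _ (by rw [mul_comm] at hlt; exact hlt)
      _ = _ := by ring
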